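-- pv_equiv track=rewrite | github.com/davidetsm/Examens-Programacio | 2019/2019-07/ej1.py | nomultiplos
-- ===== SOURCE A (Python) =====
-- def nomultiplos(n, num1, num2):
--     if n <= 0 or num1 <= 0 or num2 <= 0:
--         return None
--     lista = []
--     for i in range(1, n):
--         if i % num1 != 0 and i % num2 != 0:
--             lista.append(i)
--     return lista
-- ===== SOURCE B (Python) =====
-- def nomultiplos(n, num1, num2):
--     if n <= 0 or num1 <= 0 or num2 <= 0:
--         return None
--     mult = set(range(num1, n, num1)) | set(range(num2, n, num2))
--     return [i for i in range(1, n) if i not in mult]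
-- ===== Notes on version B (the rewrite author's own statement) =====
-- stated objective: idiomatic
-- what changed: Instead of testing i % num1 and i % num2 for every i, B precomputes the excluded multiples by stepping ranges into a set and filters range(1,n) by membership.
import Mathlib
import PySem

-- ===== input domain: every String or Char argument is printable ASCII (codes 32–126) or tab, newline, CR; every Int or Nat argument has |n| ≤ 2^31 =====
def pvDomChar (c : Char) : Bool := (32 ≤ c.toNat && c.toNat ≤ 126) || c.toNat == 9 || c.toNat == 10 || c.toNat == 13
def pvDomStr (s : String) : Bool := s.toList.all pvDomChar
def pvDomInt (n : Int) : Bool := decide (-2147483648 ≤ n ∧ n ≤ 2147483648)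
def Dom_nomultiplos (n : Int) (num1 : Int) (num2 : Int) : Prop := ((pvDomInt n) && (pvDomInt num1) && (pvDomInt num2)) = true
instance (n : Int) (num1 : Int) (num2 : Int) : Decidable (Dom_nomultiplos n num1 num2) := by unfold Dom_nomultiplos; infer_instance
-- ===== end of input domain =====

-- B precomputes the excluded multiples by stepping ranges into a set and filters range(1,n)
-- by membership, instead of testing divisibility of each element (idiomatic rewrite, same cost).


-- ===== PORT A =====
def nomultiplos (n : Int) (num1 : Int) (num2 : Int) : Option (List Int) :=
  if n ≤ 0 ∨ num1 ≤ 0 ∨ num2 ≤ 0 then none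
  else
    some ((PySem.List.pyRange 1 n 1).foldl
      (fun lista i =>
        if PySem.Int.mod i num1 ≠ 0 ∧ PySem.Int.mod i num2 ≠ 0 then lista ++ [i] else lista)
      [])

-- ===== PORT B =====
def nomultiplos_alt (n : Int) (num1 : Int) (num2 : Int) : Option (List Int) :=
  if n ≤ 0 ∨ num1 ≤ 0 ∨ num2 ≤ 0 then none
  else
    let mult : PySem.Set Int :=
      PySem.Set.union (PySem.Set.ofList (PySem.List.pyRange num1 n num1))
                      (PySem.Set.ofList (PySem.List.pyRange num2 n num2))
    some ((PySem.List.pyRange 1 n 1).filter (fun i => !(PySem.Set.contains mult i)))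

-- ===== PRECONDITION & SPEC =====
def Spec_nomultiplos (n : Int) (num1 : Int) (num2 : Int) (out : Option (List Int)) : Prop := out = nomultiplos_alt n num1 num2
instance (n : Int) (num1 : Int) (num2 : Int) (out : Option (List Int)) : Decidable (Spec_nomultiplos n num1 num2 out) := by unfold Spec_nomultiplos; infer_instance

-- ===== CLAIM (what is proved, stated in full; the proofs are below) =====
def Claim_equal_nomultiplos : Prop := ∀ (n : Int) (num1 : Int) (num2 : Int), Dom_nomultiplos n num1 num2 → Spec_nomultiplos n num1 num2 (nomultiplos n num1 num2)

-- ===== LEMMAS AND PROOFS =====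

-- For 0 < m, a positive i is in range(m, n, m) iff m divides i and i < n.
theorem mem_step_range (m n i : Int) (hm : 0 < m) (hi : 0 < i) :
    i ∈ PySem.List.pyRange m n m ↔ (i < n ∧ m ∣ i) := by
  rw [PySem.List.mem_pyRange_iff_of_pos hm]
  constructor
  · rintro ⟨_, h2, h3⟩
    have h4 := dvd_add h3 (dvd_refl m)
    rw [Int.sub_add_cancel] at h4
    exact ⟨h2, h4⟩
  · rintro ⟨h2, h3⟩
    exact ⟨Int.le_of_dvd hi h3, h2, dvd_sub h3 dvd_rfl⟩

-- The divisibility test of A agrees with the set-membership test of B on range(1, n).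
theorem filter_pred_eq (n num1 num2 : Int) (h1 : 0 < num1) (h2 : 0 < num2) (i : Int)
    (hi : i ∈ PySem.List.pyRange 1 n 1) :
    (decide (PySem.Int.mod i num1 ≠ 0 ∧ PySem.Int.mod i num2 ≠ 0)) =
      !(PySem.Set.contains
        (PySem.Set.union (PySem.Set.ofList (PySem.List.pyRange num1 n num1))
                         (PySem.Set.ofList (PySem.List.pyRange num2 n num2))) i) := by
  rw [PySem.List.mem_pyRange_one] at hi
  obtain ⟨hi1, hin⟩ := hi
  have hipos : 0 < i := by omega
  have hmem : (PySem.Set.contains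
      (PySem.Set.union (PySem.Set.ofList (PySem.List.pyRange num1 n num1))
                       (PySem.Set.ofList (PySem.List.pyRange num2 n num2))) i) =
      decide (num1 ∣ i ∨ num2 ∣ i) := by
    rw [Bool.eq_iff_iff, PySem.Set.contains_iff, PySem.Set.mem_union,
        PySem.Set.mem_ofList, PySem.Set.mem_ofList,
        mem_step_range num1 n i h1 hipos, mem_step_range num2 n i h2 hipos]
    simp only [decide_eq_true_eq]
    tauto
  rw [hmem, Bool.eq_iff_iff]
  simp only [decide_eq_true_eq, Bool.not_eq_eq_eq_not, Bool.not_true, decide_eq_false_iff_not,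
    not_or, ne_eq, PySem.Int.mod_eq_zero_iff_dvd]

-- Prop-valued variant of PySem.List.foldl_append_if for A's loop shape.
theorem foldl_append_if_prop (p : Int → Prop) [DecidablePred p] (l : List Int) (acc : List Int) :
    l.foldl (fun lista i => if p i then lista ++ [i] else lista) acc
      = acc ++ l.filter (fun i => decide (p i)) := by
  induction l generalizing acc with
  | nil => simp
  | cons x xs ih =>
    simp only [List.foldl_cons, List.filter_cons]
    by_cases h : p x
    · simp [h, ih]
    · simp [h, ih]

-- ===== VERDICT (by name: the statement is the Claim_ definition above) =====
theorem nomultiplos_spec : Claim_equal_nomultiplos := by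
  intro n num1 num2 _
  unfold Spec_nomultiplos nomultiplos nomultiplos_alt
  split
  · rfl
  · rename_i hguard
    push Not at hguard
    obtain ⟨hn, h1, h2⟩ := hguard
    rw [foldl_append_if_prop (fun i => PySem.Int.mod i num1 ≠ 0 ∧ PySem.Int.mod i num2 ≠ 0)]
    simp only [List.nil_append, Option.some.injEq]
    exact List.filter_congr (fun i hi => filter_pred_eq n num1 num2 h1 h2 i hi)
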